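-- pv_equiv track=rewrite | github.com/yairabf/get-my-subtitle | src/translator/translation_service.py | _extract_ordered_translations
-- ===== SOURCE A (Python) =====
-- from typing import Any, Dict, List, Optional, Tuple
--
-- def _extract_ordered_translations(
--     translation_map: Dict[int, str], expected_count: int
-- ) -> List[str]:
--     """
--     Extract translations in sequential order.
--
--     Args:
--         translation_map: Dictionary mapping segment ID to translation
--         expected_count: Expected number of translations
--
--     Returns:
--         List of translations in order (may be incomplete if some IDs missing)
--     """
--     translations = []
--     for i in range(1, expected_count + 1):
--         if i in translation_map:
--             translations.append(translation_map[i])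
--     return translations
-- ===== SOURCE B (Python) =====
-- def _extract_ordered_translations(translation_map, expected_count):
--     return [translation_map[i] for i in sorted(translation_map) if 1 <= i <= expected_count]
-- ===== Notes on version B (the rewrite author's own statement) =====
-- stated objective: idiomatic
-- what changed: B traverses the dictionary's own sorted keys and filters them to 1..expected_count, instead of scanning the whole index range with a membership test per index.
import Mathlib
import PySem

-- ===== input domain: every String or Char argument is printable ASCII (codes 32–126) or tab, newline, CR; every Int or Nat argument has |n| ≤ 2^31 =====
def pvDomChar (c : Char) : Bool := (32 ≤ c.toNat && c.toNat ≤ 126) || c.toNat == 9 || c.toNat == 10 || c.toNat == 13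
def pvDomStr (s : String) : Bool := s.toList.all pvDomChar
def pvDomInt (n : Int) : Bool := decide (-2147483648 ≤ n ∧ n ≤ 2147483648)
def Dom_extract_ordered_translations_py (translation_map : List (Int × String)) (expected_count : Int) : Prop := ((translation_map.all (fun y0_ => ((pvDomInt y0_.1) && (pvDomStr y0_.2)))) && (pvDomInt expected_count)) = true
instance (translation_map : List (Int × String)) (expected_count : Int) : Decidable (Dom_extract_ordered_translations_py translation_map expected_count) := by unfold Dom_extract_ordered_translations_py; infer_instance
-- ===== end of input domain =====

-- B is a sorted-keys-filter traversal instead of A's index-range scan; objective: idiomatic.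

-- ===== PORT A =====
-- for i in range(1, expected_count+1): if i in translation_map: translations.append(translation_map[i])
-- (translation_map[i] is guarded by the contains test, so getD with a dummy default is exact)
def extract_ordered_translations_py (translation_map : List (Int × String)) (expected_count : Int) : List String :=
  let d := PySem.Dict.ofList translation_map
  (PySem.List.pyRange 1 (expected_count + 1) 1).foldl
    (fun acc i => if d.contains i then acc ++ [d.getD i ""] else acc) []

-- ===== PORT B =====
-- [translation_map[i] for i in sorted(translation_map) if 1 <= i <= expected_count]
def extract_ordered_translations_py_alt (translation_map : List (Int × String)) (expected_count : Int) : List String :=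
  let d := PySem.Dict.ofList translation_map
  (((PySem.List.sorted d.keys (fun x => x) false).filter
      (fun i => decide (1 ≤ i) && decide (i ≤ expected_count))).map (fun i => d.getD i ""))

-- ===== PRECONDITION & SPEC =====
def Spec_extract_ordered_translations_py (translation_map : List (Int × String)) (expected_count : Int) (out : List String) : Prop := out = extract_ordered_translations_py_alt translation_map expected_count
instance (translation_map : List (Int × String)) (expected_count : Int) (out : List String) : Decidable (Spec_extract_ordered_translations_py translation_map expected_count out) := by unfold Spec_extract_ordered_translations_py; infer_instance

-- ===== CLAIM (what is proved, stated in full; the proofs are below) =====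
def Claim_equal_extract_ordered_translations_py : Prop := ∀ (translation_map : List (Int × String)) (expected_count : Int), Dom_extract_ordered_translations_py translation_map expected_count → Spec_extract_ordered_translations_py translation_map expected_count (extract_ordered_translations_py translation_map expected_count)

-- ===== LEMMAS AND PROOFS =====

-- two strictly increasing Int lists with the same members are equal
theorem sorted_lt_eq_of_mem_iff : ∀ (l₁ l₂ : List Int), l₁.Pairwise (· < ·) → l₂.Pairwise (· < ·) →
    (∀ x, x ∈ l₁ ↔ x ∈ l₂) → l₁ = l₂
  | [], [], _, _, _ => rfl
  | [], b :: t₂, _, _, h => absurd ((h b).mpr (List.mem_cons_self)) (List.not_mem_nil)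
  | a :: t₁, [], _, _, h => absurd ((h a).mp (List.mem_cons_self)) (List.not_mem_nil)
  | a :: t₁, b :: t₂, h₁, h₂, h => by
    have hp₁ := List.pairwise_cons.mp h₁
    have hp₂ := List.pairwise_cons.mp h₂
    have hab : a = b := by
      rcases List.mem_cons.mp ((h a).mp List.mem_cons_self) with h' | h'
      · exact h'
      · rcases List.mem_cons.mp ((h b).mpr List.mem_cons_self) with h'' | h''
        · exact h''.symm
        · exact absurd (lt_trans (hp₂.1 a h') (hp₁.1 b h'')) (lt_irrefl b)
    subst hab
    have ht : ∀ x, x ∈ t₁ ↔ x ∈ t₂ := by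
      intro x
      constructor
      · intro hx
        rcases List.mem_cons.mp ((h x).mp (List.mem_cons_of_mem _ hx)) with h' | h'
        · exact absurd (h' ▸ hp₁.1 x hx) (lt_irrefl x)
        · exact h'
      · intro hx
        rcases List.mem_cons.mp ((h x).mpr (List.mem_cons_of_mem _ hx)) with h' | h'
        · exact absurd (h' ▸ hp₂.1 x hx) (lt_irrefl x)
        · exact h'
    rw [sorted_lt_eq_of_mem_iff t₁ t₂ hp₁.2 hp₂.2 ht]

theorem extract_key_lists_eq (d : PySem.Dict Int String) (hnd : d.keys.Nodup) (ec : Int) :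
    (PySem.List.pyRange 1 (ec + 1) 1).filter (fun i => d.contains i)
      = (PySem.List.sorted d.keys (fun x => x) false).filter
          (fun i => decide (1 ≤ i) && decide (i ≤ ec)) := by
  apply sorted_lt_eq_of_mem_iff
  · exact (PySem.List.pairwise_lt_pyRange_one 1 (ec + 1)).filter _
  · have hnd : (PySem.List.sorted d.keys (fun x => x) false).Nodup :=
      (PySem.List.sorted_perm d.keys (fun x => x) false).nodup_iff.mpr hnd
    have hle : (PySem.List.sorted d.keys (fun x => x) false).Pairwise (· ≤ ·) :=
      PySem.List.sorted_pairwise d.keys (fun x => x)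
    exact ((hle.and hnd).imp (fun h => lt_of_le_of_ne h.1 h.2)).filter _
  · intro x
    simp only [List.mem_filter, PySem.List.mem_pyRange_one, PySem.List.mem_sorted,
      PySem.Dict.contains_iff_mem_keys, Bool.and_eq_true, decide_eq_true_eq, Int.lt_add_one_iff]
    tauto

theorem extract_ordered_translations_py_spec : Claim_equal_extract_ordered_translations_py := by
  intro translation_map expected_count _
  unfold Spec_extract_ordered_translations_py extract_ordered_translations_py
    extract_ordered_translations_py_alt
  rw [PySem.List.foldl_append_if, List.nil_append,
    extract_key_lists_eq _ (PySem.Dict.nodup_keys_ofList translation_map)]
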